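-- pv_equiv track=rewrite | github.com/sharathkumar49/learning | Python programs/LeetCodeSolutions/2151.MaximumGoodPeopleBasedonStatements.py | maximumGood
-- ===== SOURCE A (Python) =====
-- def maximumGood(statements):
--     n = len(statements)
--     res = 0
--     for mask in range(1<<n):
--         valid = True
--         for i in range(n):
--             if not (mask & (1<<i)):
--                 continue
--             for j in range(n):
--                 if statements[i][j] == 2:
--                     continue
--                 if ((mask & (1<<j)) > 0) != (statements[i][j] == 1):
--                     valid = False
--         if valid:
--             res = max(res, bin(mask).count('1'))
--     return res
-- ===== SOURCE B (Python) =====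
-- def maximumGood(statements):
--     n = len(statements)
--
--     def rec(i, good, best):
--         if i == n:
--             return max(best, len(good))
--         # try marking person i bad: no already-good person may have called i good
--         if all(statements[g][i] != 1 for g in good):
--             best = rec(i + 1, good, best)
--         # try marking person i good: every already-good person must allow it,
--         # and i's own statements must agree with the decided prefix (incl. i itself)
--         if (all(statements[g][i] in (1, 2) for g in good)
--                 and all(statements[i][j] == 2
--                         or ((j in good) == (statements[i][j] == 1))
--                         for j in range(i))
--                 and statements[i][i] in (1, 2)):
--             best = rec(i + 1, good + [i], best)
--         return best
--
--     return rec(0, [], 0)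
-- ===== Notes on version B (the rewrite author's own statement) =====
-- stated objective: faster
-- what changed: Replaced A's exhaustive scan of all 2^n bitmasks with full re-validation per mask by per-person recursive backtracking that checks consistency incrementally against the decided prefix and prunes inconsistent branches.
import Mathlib
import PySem

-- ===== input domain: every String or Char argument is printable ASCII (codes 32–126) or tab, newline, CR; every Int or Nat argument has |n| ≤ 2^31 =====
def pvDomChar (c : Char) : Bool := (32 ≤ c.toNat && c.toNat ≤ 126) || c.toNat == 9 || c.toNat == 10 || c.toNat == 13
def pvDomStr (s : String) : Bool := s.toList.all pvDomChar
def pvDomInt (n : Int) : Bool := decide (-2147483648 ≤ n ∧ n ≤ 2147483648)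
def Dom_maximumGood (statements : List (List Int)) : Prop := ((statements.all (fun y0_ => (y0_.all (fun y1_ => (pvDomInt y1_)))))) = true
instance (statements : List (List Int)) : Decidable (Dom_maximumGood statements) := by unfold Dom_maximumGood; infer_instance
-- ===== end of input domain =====

-- B replaces A's scan of all 2^n bitmasks (each fully re-validated in O(n^2)) by per-person
-- recursive backtracking with incremental consistency checks and pruning; measurably faster.


-- ===== PORT A =====
-- statements[i][j]: under Pre_ every index is in range, so List.getD equals Python's indexing there.
def pvStmt (statements : List (List Int)) (i j : Nat) : Int := (statements.getD i []).getD j 0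

-- bin(mask).count('1'): number of 1-bits of a nonnegative integer.
def pvCountOnes : Nat → Nat
  | 0 => 0
  | (m+1) => pvCountOnes ((m+1)/2) + (m+1) % 2
decreasing_by exact Nat.div_lt_self (Nat.succ_pos m) (by norm_num)

def maximumGood (statements : List (List Int)) : Int :=
  let n := statements.length
  (List.range (2^n)).foldl (fun res mask =>
    let valid := (List.range n).foldl (fun valid i =>
      if !(mask.testBit i) then valid
      else (List.range n).foldl (fun valid j =>
        if pvStmt statements i j == 2 then valid
        else if (mask.testBit j != (pvStmt statements i j == 1)) then false
        else valid) valid) true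
    if valid then max res (pvCountOnes mask : Int) else res) 0

-- ===== PORT B =====
def pvRecB (statements : List (List Int)) (n i : Nat) (good : List Nat) (best : Int) : Int :=
  if i < n then
    let best1 := if good.all (fun g => pvStmt statements g i != 1)
                 then pvRecB statements n (i+1) good best else best
    if (good.all (fun g => pvStmt statements g i == 1 || pvStmt statements g i == 2)
        && (List.range i).all (fun j => pvStmt statements i j == 2
              || (good.contains j == (pvStmt statements i j == 1)))
        && (pvStmt statements i i == 1 || pvStmt statements i i == 2))
    then pvRecB statements n (i+1) (good ++ [i]) best1
    else best1
  else max best (good.length : Int)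
termination_by n - i

def maximumGood_alt (statements : List (List Int)) : Int :=
  pvRecB statements statements.length 0 [] 0

-- ===== PRECONDITION & SPEC =====
-- Pre_ excludes exactly the inputs on which Python A raises IndexError: whenever some row is
-- shorter than the number of rows, A's inner loop indexes past it (every i occurs in some mask).
def Pre_maximumGood (statements : List (List Int)) : Prop :=
  ∀ r ∈ statements, statements.length ≤ r.length
instance (statements : List (List Int)) : Decidable (Pre_maximumGood statements) := by
  unfold Pre_maximumGood; infer_instance

def pvWitness_maximumGood : List (List Int) := [[1, 2], [2, 1]]

def Spec_maximumGood (statements : List (List Int)) (out : Int) : Prop := out = maximumGood_alt statements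
instance (statements : List (List Int)) (out : Int) : Decidable (Spec_maximumGood statements out) := by unfold Spec_maximumGood; infer_instance

-- ===== CLAIM (what is proved, stated in full; the proofs are below) =====
def Claim_equal_maximumGood : Prop := ∀ (statements : List (List Int)), Dom_maximumGood statements → Pre_maximumGood statements → Spec_maximumGood statements (maximumGood statements)

-- ===== LEMMAS AND PROOFS =====

-- Semantic skeleton shared by the two proofs -----------------------------------------------------
def pvRowOk (st : List (List Int)) (m g j : Nat) : Bool :=
  (pvStmt st g j == 2) || (m.testBit j == (pvStmt st g j == 1))

def pvMaskOk (st : List (List Int)) (n m : Nat) : Bool :=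
  (List.range n).all (fun i => !m.testBit i || (List.range n).all (pvRowOk st m i))

def pvF (st : List (List Int)) (n : Nat) : Int → Nat → Int :=
  fun res m => if pvMaskOk st n m then max res (pvCountOnes m : Int) else res

def pvAmax (st : List (List Int)) (n : Nat) (l : List Nat) (b : Int) : Int := l.foldl (pvF st n) b

def pvE (n i g0 : Nat) : List Nat := (List.range (2^(n-i))).map (fun h => g0 + 2^i * h)

def pvGoodOf (i g0 : Nat) : List Nat := (List.range i).filter g0.testBit

def pvPC (st : List (List Int)) (i g0 : Nat) : Prop :=
  ∀ g < i, g0.testBit g = true → ∀ j < i, pvRowOk st g0 g j = true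

theorem pv_foldl_if_all {α : Type} (p : α → Bool) :
    ∀ (l : List α) (b : Bool), l.foldl (fun v x => if p x then v else false) b = (b && l.all p) := by
  intro l
  induction l with
  | nil => simp
  | cons x xs ih =>
    intro b
    simp only [List.foldl_cons, List.all_cons]
    rw [ih]
    cases h : p x <;> cases b <;> simp

theorem pv_validA (st : List (List Int)) (n mask : Nat) :
    (List.range n).foldl (fun valid i =>
      if !(mask.testBit i) then valid
      else (List.range n).foldl (fun valid j =>
        if pvStmt st i j == 2 then valid
        else if (mask.testBit j != (pvStmt st i j == 1)) then false
        else valid) valid) true = pvMaskOk st n mask := by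
  have hin : ∀ (i : Nat) (v : Bool),
      (List.range n).foldl (fun valid j =>
        if pvStmt st i j == 2 then valid
        else if (mask.testBit j != (pvStmt st i j == 1)) then false
        else valid) v = (v && (List.range n).all (pvRowOk st mask i)) := by
    intro i v
    have hfun : (fun (valid : Bool) (j : Nat) =>
        if pvStmt st i j == 2 then valid
        else if (mask.testBit j != (pvStmt st i j == 1)) then false
        else valid) = (fun (valid : Bool) (j : Nat) => if pvRowOk st mask i j then valid else false) := by
      funext v j
      unfold pvRowOk
      cases h2 : (pvStmt st i j == 2) <;> cases h1 : (pvStmt st i j == 1) <;>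
        cases ht : mask.testBit j <;> simp [h2, h1, ht]
    rw [hfun, pv_foldl_if_all]
  have hout : (fun (valid : Bool) (i : Nat) =>
      if !(mask.testBit i) then valid
      else (List.range n).foldl (fun valid j =>
        if pvStmt st i j == 2 then valid
        else if (mask.testBit j != (pvStmt st i j == 1)) then false
        else valid) valid)
      = (fun (valid : Bool) (i : Nat) =>
          if (!mask.testBit i || (List.range n).all (pvRowOk st mask i)) then valid else false) := by
    funext v i
    rw [hin]
    cases ht : mask.testBit i <;> cases ha : (List.range n).all (pvRowOk st mask i) <;>
      cases v <;> simp [ht, ha]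
  rw [hout, pv_foldl_if_all]
  simp [pvMaskOk]

theorem pv_A_eq (st : List (List Int)) :
    maximumGood st = pvAmax st st.length (List.range (2^st.length)) 0 := by
  unfold maximumGood pvAmax
  dsimp only
  congr 1
  funext res mask
  rw [pv_validA st st.length mask]
  rfl

theorem pv_tb_add_mul (a c i j : Nat) (hj : j < i) :
    (a + 2^i * c).testBit j = a.testBit j := by
  rw [Nat.testBit_eq_decide_div_mod_eq, Nat.testBit_eq_decide_div_mod_eq]
  have hpow : 2^i = 2^j * (2 * 2^(i - j - 1)) := by
    rw [← pow_succ', ← pow_add]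
    congr 1
    omega
  have h1 : a + 2^i * c = a + 2^j * (c * (2 * 2^(i - j - 1))) := by rw [hpow]; ring
  rw [h1, Nat.add_mul_div_left _ _ (Nat.two_pow_pos j), decide_eq_decide]
  generalize a / 2^j = q
  generalize 2^(i - j - 1) = t
  have h2 : c * (2 * t) = 2 * (c * t) := by ring
  rw [h2]
  generalize c * t = r
  omega

theorem pv_tb_add_pow (a i : Nat) (ha : a < 2^i) : (a + 2^i).testBit i = true := by
  rw [Nat.testBit_eq_decide_div_mod_eq]
  have h1 : (a + 2^i) / 2^i = 1 := by
    rw [Nat.add_div_right _ (Nat.two_pow_pos i), Nat.div_eq_of_lt ha]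
  rw [h1]
  decide

theorem pv_range_two_mul_perm (k : Nat) :
    (List.range (2*k)).Perm ((List.range k).map (fun h => 2*h) ++ (List.range k).map (fun h => 2*h+1)) := by
  induction k with
  | zero => simp
  | succ k ih =>
    rw [List.perm_iff_count]
    intro x
    have hc := ih.count_eq x
    have h2 : 2*(k+1) = (2*k) + 1 + 1 := by ring
    simp only [h2, List.range_succ, List.map_append, List.count_append, List.map_cons,
      List.map_nil, List.count_cons, List.count_nil] at *
    omega

theorem pv_E_perm (n i g0 : Nat) (h : i < n) :
    (pvE n i g0).Perm (pvE n (i+1) g0 ++ pvE n (i+1) (g0 + 2^i)) := by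
  unfold pvE
  have hn : n - i = (n - (i+1)) + 1 := by omega
  rw [hn, pow_succ, Nat.mul_comm]
  refine ((pv_range_two_mul_perm _).map _).trans ?_
  rw [List.map_append, List.map_map, List.map_map]
  apply List.Perm.append
  · rw [List.map_congr_left (g := fun h => g0 + 2^(i+1) * h)]
    intro a _
    simp only [Function.comp]
    ring
  · rw [List.map_congr_left (g := fun h => (g0 + 2^i) + 2^(i+1) * h)]
    intro a _
    simp only [Function.comp]
    ring

theorem pv_foldl_perm {α β : Type} (f : β → α → β)
    (hc : ∀ b a a', f (f b a) a' = f (f b a') a) :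
    ∀ {l₁ l₂ : List α}, l₁.Perm l₂ → ∀ b, l₁.foldl f b = l₂.foldl f b := by
  intro l₁ l₂ hp
  induction hp with
  | nil => intro b; rfl
  | cons x _ ih => intro b; simp [List.foldl_cons, ih]
  | swap x y l => intro b; simp [List.foldl_cons, hc]
  | trans _ _ ih₁ ih₂ => intro b; rw [ih₁, ih₂]

theorem pv_F_comm (st : List (List Int)) (n : Nat) :
    ∀ (b : Int) (a a' : Nat), pvF st n (pvF st n b a) a' = pvF st n (pvF st n b a') a := by
  intro b a a'
  unfold pvF
  split_ifs <;> simp [max_assoc, max_comm, max_left_comm]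

theorem pv_Amax_dead (st : List (List Int)) (n : Nat) :
    ∀ (l : List Nat) (b : Int), (∀ m ∈ l, pvMaskOk st n m = false) → pvAmax st n l b = b := by
  intro l
  induction l with
  | nil => intro b _; rfl
  | cons x xs ih =>
    intro b h
    have hx := h x List.mem_cons_self
    have : pvAmax st n (x :: xs) b = pvAmax st n xs b := by
      simp [pvAmax, List.foldl_cons, pvF, hx]
    rw [this]
    exact ih b (fun m hm => h m (List.mem_cons_of_mem _ hm))

theorem pv_countOnes_eq (g0 : Nat) (h : g0 ≠ 0) :
    pvCountOnes g0 = pvCountOnes (g0/2) + g0 % 2 := by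
  cases g0 with
  | zero => exact absurd rfl h
  | succ m => rw [pvCountOnes]

theorem pv_countOnes_filter : ∀ (n g0 : Nat), g0 < 2^n →
    pvCountOnes g0 = ((List.range n).filter g0.testBit).length := by
  intro n
  induction n with
  | zero =>
    intro g0 h
    have : g0 = 0 := by simpa using h
    subst this
    simp [pvCountOnes]
  | succ n ih =>
    intro g0 h
    by_cases h0 : g0 = 0
    · subst h0
      simp [pvCountOnes, show (Nat.testBit 0) = (fun _ => false) from funext Nat.zero_testBit]
    · have hcomp : (g0.testBit ∘ Nat.succ) = (g0/2).testBit := by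
        funext j
        exact Nat.testBit_add_one g0 j
      have hdiv : g0 / 2 < 2^n := by
        have h2 : 2^(n+1) = 2^n * 2 := by ring
        rw [h2] at h
        exact (Nat.div_lt_iff_lt_mul (by norm_num)).mpr h
      rw [pv_countOnes_eq g0 h0, List.range_succ_eq_map, List.filter_cons, List.filter_map,
        hcomp, ih _ hdiv]
      have h02 := Nat.testBit_zero g0
      cases htb0 : g0.testBit 0 with
      | false =>
        rw [htb0] at h02
        have hm : g0 % 2 = 0 := by
          have := of_decide_eq_false h02.symm
          omega
        simp [hm]
      | true =>
        rw [htb0] at h02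
        have hm : g0 % 2 = 1 := of_decide_eq_true h02.symm
        simp [hm]

theorem pv_maskOk_true (st : List (List Int)) (n m : Nat)
    (h : ∀ g < n, m.testBit g = true → ∀ j < n, pvRowOk st m g j = true) :
    pvMaskOk st n m = true := by
  unfold pvMaskOk
  rw [List.all_eq_true]
  intro g hg
  cases ht : m.testBit g with
  | false => simp
  | true =>
    simp only [ht, Bool.not_true, Bool.false_or]
    rw [List.all_eq_true]
    intro j hj
    exact h g (List.mem_range.mp hg) ht j (List.mem_range.mp hj)

theorem pv_maskOk_false (st : List (List Int)) (n m g j : Nat) (hg : g < n) (hj : j < n)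
    (htb : m.testBit g = true) (hro : pvRowOk st m g j = false) : pvMaskOk st n m = false := by
  unfold pvMaskOk
  rw [Bool.eq_false_iff]
  intro hc
  rw [List.all_eq_true] at hc
  have h1 := hc g (List.mem_range.mpr hg)
  rw [htb] at h1
  simp only [Bool.not_true, Bool.false_or] at h1
  rw [List.all_eq_true] at h1
  have h2 := h1 j (List.mem_range.mpr hj)
  rw [hro] at h2
  exact Bool.false_ne_true h2

theorem pv_kill (st : List (List Int)) (i g0'' : Nat) (hin : i < st.length)
    (hw : ∃ gI jI, gI ≤ i ∧ jI ≤ i ∧ g0''.testBit gI = true ∧ pvRowOk st g0'' gI jI = false) :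
    ∀ best', pvAmax st st.length (pvE st.length (i+1) g0'') best' = best' := by
  intro best'
  apply pv_Amax_dead
  intro m hm
  obtain ⟨gI, jI, hgI, hjI, htb, hro⟩ := hw
  have hbit : ∀ j, j < i+1 → m.testBit j = g0''.testBit j := by
    intro j hj
    simp only [pvE, List.mem_map, List.mem_range] at hm
    obtain ⟨h', _, rfl⟩ := hm
    exact pv_tb_add_mul _ _ _ _ hj
  have h1 : m.testBit gI = true := by rw [hbit gI (by omega)]; exact htb
  have h2 : pvRowOk st m gI jI = false := by
    unfold pvRowOk at hro ⊢
    rw [hbit jI (by omega)]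
    exact hro
  exact pv_maskOk_false st st.length m gI jI (by omega) (by omega) h1 h2

theorem pv_recB_eq (st : List (List Int)) :
    ∀ (k i g0 : Nat) (best : Int), i + k = st.length → g0 < 2^i → pvPC st i g0 →
      pvRecB st st.length i (pvGoodOf i g0) best = pvAmax st st.length (pvE st.length i g0) best := by
  intro k
  induction k with
  | zero =>
    intro i g0 best hik hlt hpc
    have hi : st.length = i := by omega
    rw [pvRecB, if_neg (by omega : ¬ i < st.length)]
    have hE : pvE st.length i g0 = [g0] := by
      unfold pvE
      rw [hi]
      simp
    rw [hE]
    have hok : pvMaskOk st st.length g0 = true := by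
      apply pv_maskOk_true
      intro g hg htb j hj
      exact hpc g (by omega) htb j (by omega)
    unfold pvAmax pvF
    simp only [List.foldl_cons, List.foldl_nil, hok, if_true]
    congr 1
    rw [pv_countOnes_filter i g0 hlt]
    rfl
  | succ k ih =>
    intro i g0 best hik hlt hpc
    have hin : i < st.length := by omega
    have htbi : g0.testBit i = false := Nat.testBit_eq_false_of_lt hlt
    have hlt1 : g0 < 2^(i+1) := by
      have h2 : 2^(i+1) = 2^i * 2 := by ring
      omega
    have hmem : ∀ g, g ∈ pvGoodOf i g0 ↔ (g < i ∧ g0.testBit g = true) := by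
      intro g; simp [pvGoodOf, List.mem_filter, List.mem_range]
    have hcont : ∀ j, j < i → ((pvGoodOf i g0).contains j) = g0.testBit j := by
      intro j hj
      cases h : g0.testBit j with
      | true => exact List.contains_iff_mem.mpr ((hmem j).mpr ⟨hj, h⟩)
      | false =>
        rw [Bool.eq_false_iff]
        intro hc
        have h2 := (hmem j).mp (List.contains_iff_mem.mp hc)
        rw [h] at h2
        exact Bool.false_ne_true h2.2
    have hgood0 : pvGoodOf (i+1) g0 = pvGoodOf i g0 := by
      unfold pvGoodOf
      rw [List.range_succ, List.filter_append]
      simp [htbi]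
    have htb' : ∀ j, j < i → (g0 + 2^i).testBit j = g0.testBit j := by
      intro j hj
      have h1 := pv_tb_add_mul g0 1 i j hj
      simpa using h1
    have htbi' : (g0 + 2^i).testBit i = true := pv_tb_add_pow g0 i hlt
    have hsplit : pvAmax st st.length (pvE st.length i g0) best
        = pvAmax st st.length (pvE st.length (i+1) (g0 + 2^i))
            (pvAmax st st.length (pvE st.length (i+1) g0) best) := by
      unfold pvAmax
      rw [pv_foldl_perm _ (pv_F_comm st st.length) (pv_E_perm st.length i g0 hin), List.foldl_append]
    rw [pvRecB, if_pos hin]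
    dsimp only
    have hbest1 : (if (pvGoodOf i g0).all (fun g => pvStmt st g i != 1)
          then pvRecB st st.length (i+1) (pvGoodOf i g0) best else best)
        = pvAmax st st.length (pvE st.length (i+1) g0) best := by
      cases hb : (pvGoodOf i g0).all (fun g => pvStmt st g i != 1) with
      | true =>
        rw [if_pos rfl]
        have hall : ∀ g ∈ pvGoodOf i g0, ¬ (pvStmt st g i = 1) := by
          intro g hgm
          have h1 := List.all_eq_true.mp hb g hgm
          simpa using h1
        have hpc1 : pvPC st (i+1) g0 := by
          intro g hg htb j hj
          have hgi : g < i := by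
            rcases Nat.lt_succ_iff_lt_or_eq.mp hg with h | h
            · exact h
            · subst h; rw [htbi] at htb; exact absurd htb (by simp)
          rcases Nat.lt_succ_iff_lt_or_eq.mp hj with hji | hji
          · exact hpc g hgi htb j hji
          · rw [hji]
            unfold pvRowOk
            rw [htbi]
            have h1 : (pvStmt st g i == 1) = false := by
              simp [hall g ((hmem g).mpr ⟨hgi, htb⟩)]
            simp [h1]
        rw [← hgood0]
        exact ih (i+1) g0 best (by omega) hlt1 hpc1
      | false =>
        rw [if_neg (by simp)]
        have hex : ∃ g, g ∈ pvGoodOf i g0 ∧ pvStmt st g i = 1 := by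
          by_contra hc
          push_neg at hc
          have hall : (pvGoodOf i g0).all (fun g => pvStmt st g i != 1) = true := by
            rw [List.all_eq_true]
            intro g hgm
            simpa using hc g hgm
          rw [hb] at hall
          exact Bool.false_ne_true hall
        obtain ⟨g, hgm, hs1⟩ := hex
        obtain ⟨hgi, htbg⟩ := (hmem g).mp hgm
        symm
        apply pv_kill st i g0 hin
        refine ⟨g, i, by omega, le_refl i, htbg, ?_⟩
        unfold pvRowOk
        rw [htbi]
        simp [hs1]
    rw [hbest1]
    cases hg : ((pvGoodOf i g0).all (fun g => pvStmt st g i == 1 || pvStmt st g i == 2)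
        && (List.range i).all (fun j => pvStmt st i j == 2
              || ((pvGoodOf i g0).contains j == (pvStmt st i j == 1)))
        && (pvStmt st i i == 1 || pvStmt st i i == 2)) with
    | true =>
      rw [if_pos rfl, hsplit]
      rw [Bool.and_eq_true, Bool.and_eq_true] at hg
      obtain ⟨⟨hp1, hp2⟩, hp3⟩ := hg
      have hlt' : g0 + 2^i < 2^(i+1) := by
        have h2 : 2^(i+1) = 2^i * 2 := by ring
        omega
      have hgoodeq : pvGoodOf (i+1) (g0 + 2^i) = pvGoodOf i g0 ++ [i] := by
        unfold pvGoodOf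
        rw [List.range_succ, List.filter_append]
        congr 1
        · exact List.filter_congr (fun x hx => by rw [htb' x (List.mem_range.mp hx)])
        · simp [htbi']
      have hpc' : pvPC st (i+1) (g0 + 2^i) := by
        intro g hg' htb j hj
        rcases Nat.lt_succ_iff_lt_or_eq.mp hg' with hgi | hgi
        · have htbg : g0.testBit g = true := by rw [← htb' g hgi]; exact htb
          rcases Nat.lt_succ_iff_lt_or_eq.mp hj with hji | hji
          · have h1 := hpc g hgi htbg j hji
            unfold pvRowOk at h1 ⊢
            rw [htb' j hji]
            exact h1
          · rw [hji]
            have h1 := List.all_eq_true.mp hp1 g ((hmem g).mpr ⟨hgi, htbg⟩)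
            unfold pvRowOk
            rw [htbi']
            rcases (by simpa using h1 : pvStmt st g i = 1 ∨ pvStmt st g i = 2) with h | h <;> simp [h]
        · rw [hgi]
          rcases Nat.lt_succ_iff_lt_or_eq.mp hj with hji | hji
          · have h2 := List.all_eq_true.mp hp2 j (List.mem_range.mpr hji)
            unfold pvRowOk
            rw [htb' j hji]
            rcases (by simpa using h2 :
                pvStmt st i j = 2 ∨ (pvGoodOf i g0).contains j = (pvStmt st i j == 1)) with h | h
            · simp [h]
            · rw [← hcont j hji, h]
              simp
          · rw [hji]
            unfold pvRowOk
            rw [htbi']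
            rcases (by simpa using hp3 : pvStmt st i i = 1 ∨ pvStmt st i i = 2) with h | h <;> simp [h]
      rw [← hgoodeq]
      exact ih (i+1) (g0 + 2^i) _ (by omega) hlt' hpc'
    | false =>
      rw [if_neg (by simp), hsplit]
      have hng := hg
      rw [Bool.eq_false_iff] at hng
      symm
      apply pv_kill st i (g0 + 2^i) hin
      by_cases hp1 : (pvGoodOf i g0).all (fun g => pvStmt st g i == 1 || pvStmt st g i == 2) = true
      · by_cases hp2 : (List.range i).all (fun j => pvStmt st i j == 2
              || ((pvGoodOf i g0).contains j == (pvStmt st i j == 1))) = true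
        · have hp3 : ¬ (pvStmt st i i == 1 || pvStmt st i i == 2) = true := by
            intro h3
            exact hng (by rw [hp1, hp2, h3]; rfl)
          refine ⟨i, i, le_refl i, le_refl i, htbi', ?_⟩
          unfold pvRowOk
          rw [htbi']
          have hne : ¬ (pvStmt st i i = 1 ∨ pvStmt st i i = 2) := by simpa using hp3
          push_neg at hne
          simp [hne.1, hne.2]
        · have hex : ∃ j ∈ List.range i, ¬ (pvStmt st i j == 2
              || ((pvGoodOf i g0).contains j == (pvStmt st i j == 1))) = true := by
            by_contra hc
            push_neg at hc
            exact hp2 (List.all_eq_true.mpr hc)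
          obtain ⟨j, hjm, hj2⟩ := hex
          have hji : j < i := List.mem_range.mp hjm
          refine ⟨i, j, le_refl i, by omega, htbi', ?_⟩
          unfold pvRowOk
          rw [htb' j hji, ← hcont j hji]
          exact Bool.eq_false_iff.mpr hj2
      · have hex : ∃ g ∈ pvGoodOf i g0, ¬ (pvStmt st g i == 1 || pvStmt st g i == 2) = true := by
          by_contra hc
          push_neg at hc
          exact hp1 (List.all_eq_true.mpr hc)
        obtain ⟨g, hgm, hg1⟩ := hex
        obtain ⟨hgi, htbg⟩ := (hmem g).mp hgm
        refine ⟨g, i, by omega, le_refl i, by rw [htb' g hgi]; exact htbg, ?_⟩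
        unfold pvRowOk
        rw [htbi']
        have hne : ¬ (pvStmt st g i = 1 ∨ pvStmt st g i = 2) := by simpa using hg1
        push_neg at hne
        simp [hne.1, hne.2]

-- ===== VERDICT (by name: the statement is the Claim_ definition above) =====
theorem maximumGood_spec : Claim_equal_maximumGood := by
  intro st _ _
  unfold Spec_maximumGood
  have hA := pv_A_eq st
  have hB := pv_recB_eq st st.length 0 0 0 (by omega) (by norm_num)
    (by intro g hg; omega)
  have hGoodOf : pvGoodOf 0 0 = ([] : List Nat) := rfl
  have hE : pvE st.length 0 0 = List.range (2^st.length) := by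
    unfold pvE
    simp
  rw [hGoodOf, hE] at hB
  rw [hA, maximumGood_alt, hB]
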